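-- pv_equiv track=rewrite | github.com/skawsarani/sams-product-os | evals/test_workflows.py | _parse_backlog
-- ===== SOURCE A (Python) =====
-- def _parse_backlog(content: str) -> list[dict]:
--     """Parse backlog content into items."""
--     lines = content.split('\n')
--     items = []
--     current_item = None
--
--     for line in lines:
--         stripped = line.strip()
--         if not stripped:
--             continue
--         if stripped.startswith('# ') and not stripped.startswith('## '):
--             continue
--         if stripped.startswith('## '):
--             if current_item:
--                 items.append(current_item)
--             title = stripped[3:].strip()
--             current_item = {"title": title, "description": ""}
--         elif current_item is not None:
--             if stripped.startswith(('- ', '* ', '+ ')):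
--                 current_item["description"] += stripped + "\n"
--             else:
--                 if current_item["description"]:
--                     current_item["description"] += " " + stripped
--                 else:
--                     current_item["description"] = stripped
--
--     if current_item:
--         items.append(current_item)
--
--     return items
-- ===== SOURCE B (Python) =====
-- def _parse_backlog(content: str) -> list[dict]:
--     """Parse backlog content into items: first group stripped lines into per-'## ' segments, then reduce each segment to one item."""
--     # pass 1: segments of stripped lines, each starting with its '## ' header line
--     segments = []
--     for line in content.split('\n'):
--         s = line.strip()
--         if s.startswith('## '):
--             segments.append([s])
--         elif segments:
--             segments[-1].append(s)
--     # pass 2: one item per segment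
--     return [_segment_item(seg) for seg in segments]
--
--
-- def _segment_item(seg: list) -> dict:
--     desc = ""
--     for s in seg[1:]:
--         if not s:
--             continue
--         if s.startswith('# ') and not s.startswith('## '):
--             continue
--         if s.startswith(('- ', '* ', '+ ')):
--             desc += s + "\n"
--         elif desc:
--             desc += " " + s
--         else:
--             desc = s
--     return {"title": seg[0][3:].strip(), "description": desc}
-- ===== Notes on version B (the rewrite author's own statement) =====
-- stated objective: alternative
-- what changed: B replaces A's single stateful pass (accumulating title/description in a current-item dict with a flush) by two passes: first group the stripped lines into raw per-'## '-header segments, then reduce each segment independently to its item dict.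
import Mathlib
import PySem

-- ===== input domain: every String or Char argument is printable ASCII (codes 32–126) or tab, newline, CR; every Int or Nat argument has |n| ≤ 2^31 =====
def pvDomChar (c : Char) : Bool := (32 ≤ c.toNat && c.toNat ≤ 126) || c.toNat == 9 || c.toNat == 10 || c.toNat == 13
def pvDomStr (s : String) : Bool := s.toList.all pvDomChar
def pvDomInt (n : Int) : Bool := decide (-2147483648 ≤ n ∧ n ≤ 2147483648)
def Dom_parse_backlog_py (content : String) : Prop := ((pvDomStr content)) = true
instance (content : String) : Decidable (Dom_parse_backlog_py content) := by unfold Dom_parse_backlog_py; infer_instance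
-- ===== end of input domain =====

-- B replaces A's single stateful pass (current-item with flush) by two passes: group the stripped
-- lines into raw per-'## '-header segments, then reduce each segment independently to its item
-- (objective: alternative decomposition, same cost).


-- ===== PORT A =====
-- current_item = {"title": t, "description": d} is carried as the pair (t, d); appending it to
-- items materialises the dict [("title", t), ("description", d)] (insertion order "title" first;
-- the in-place "description" update overwrites, keeping that order)
def pvDictA (p : String × String) : List (String × String) := [("title", p.1), ("description", p.2)]

-- the body of A's for-loop, on the state (items, current_item)
def pvStepA (st : List (List (String × String)) × Option (String × String)) (line : String) :
    List (List (String × String)) × Option (String × String) :=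
  let s := PySem.Str.strip line
  if s = "" then st
  else if PySem.Str.startswith s "# " && !(PySem.Str.startswith s "## ") then st
  else if PySem.Str.startswith s "## " then
    -- `if current_item:` — the dict always has two keys, so it is truthy iff not None
    (st.1 ++ (match st.2 with | some p => [pvDictA p] | none => []),
     some (PySem.Str.strip (PySem.Str.slice s (some 3) none), ""))
  else match st.2 with
    | none => st
    | some (t, d) =>
      if PySem.Str.startswith s "- " || PySem.Str.startswith s "* " || PySem.Str.startswith s "+ " then
        (st.1, some (t, d ++ s ++ "\n"))
      else if d = "" then (st.1, some (t, s))
      else (st.1, some (t, d ++ " " ++ s))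

def parse_backlog_py (content : String) : List (List (String × String)) :=
  -- content.split('\n'): the separator "\n" is nonempty, so split? is always some — exact
  let lines := (PySem.Str.split? content "\n").getD []
  let st := lines.foldl pvStepA ([], none)
  st.1 ++ (match st.2 with | some p => [pvDictA p] | none => [])

-- ===== PORT B =====
-- pass-1 loop body: `segments.append([s])` on a '## ' header, else `segments[-1].append(s)` when
-- segments is nonempty (dropLast ++ [getLast ++ [s]] is exactly the in-place append to the last)
def pvStepB (segs : List (List String)) (line : String) : List (List String) :=
  let s := PySem.Str.strip line
  if PySem.Str.startswith s "## " then segs ++ [[s]]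
  else if segs = [] then segs
  else segs.dropLast ++ [(segs.getLast?.getD []) ++ [s]]

-- the body of _segment_item's for-loop (accumulator: desc)
def pvDstep (d s : String) : String :=
  if s = "" then d
  else if PySem.Str.startswith s "# " && !(PySem.Str.startswith s "## ") then d
  else if PySem.Str.startswith s "- " || PySem.Str.startswith s "* " || PySem.Str.startswith s "+ " then
    d ++ s ++ "\n"
  else if d = "" then s
  else d ++ " " ++ s

-- _segment_item(seg)
def pvSegItem (seg : List String) : List (String × String) :=
  [("title", PySem.Str.strip (PySem.Str.slice (seg.headD "") (some 3) none)),
   ("description", (seg.drop 1).foldl pvDstep "")]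

def parse_backlog_py_alt (content : String) : List (List (String × String)) :=
  let segs := ((PySem.Str.split? content "\n").getD []).foldl pvStepB []
  segs.map pvSegItem

-- ===== PRECONDITION & SPEC =====
def Spec_parse_backlog_py (content : String) (out : List (List (String × String))) : Prop := out = parse_backlog_py_alt content
instance (content : String) (out : List (List (String × String))) : Decidable (Spec_parse_backlog_py content out) := by unfold Spec_parse_backlog_py; infer_instance

-- ===== CLAIM (what is proved, stated in full; the proofs are below) =====
def Claim_equal_parse_backlog_py : Prop := ∀ (content : String), Dom_parse_backlog_py content → Spec_parse_backlog_py content (parse_backlog_py content)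

-- ===== LEMMAS AND PROOFS =====

-- the (title, description) pair A's current_item holds once exactly the lines of `seg` were seen
def pvFP (seg : List String) : String × String :=
  (PySem.Str.strip (PySem.Str.slice (seg.headD "") (some 3) none), (seg.drop 1).foldl pvDstep "")

-- a string with prefix "# " or "## " is nonempty
lemma pv_ne_empty {s p : String} (hp : p ≠ "") (h : PySem.Str.startswith s p = true) : s ≠ "" := by
  intro h0; subst h0
  rw [PySem.Str.startswith_eq, PySem.Chars.startswith_iff] at h
  have hp' : p.toList = [] := List.prefix_nil.mp (by simpa using h)
  exact hp (by have := congrArg String.ofList hp'; simpa [String.ofList] using this)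

lemma pvFP_append (c : List String) (hc : c ≠ []) (s : String) :
    pvFP (c ++ [s]) = ((pvFP c).1, pvDstep (pvFP c).2 s) := by
  obtain ⟨a, c', rfl⟩ := List.exists_cons_of_ne_nil hc
  simp [pvFP]

-- one loop step: A's state is the image of B's segment list (items = all but the last segment
-- reduced, current_item = the last segment's pair), and B's segments stay nonempty
lemma pv_step (line : String) (segs : List (List String)) (h : ∀ c ∈ segs, c ≠ []) :
    pvStepA (segs.dropLast.map pvSegItem, segs.getLast?.map pvFP) line =
      ((pvStepB segs line).dropLast.map pvSegItem, (pvStepB segs line).getLast?.map pvFP) ∧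
    (∀ c ∈ pvStepB segs line, c ≠ []) := by
  by_cases hH : PySem.Str.startswith (PySem.Str.strip line) "## " = true
  · have hne : PySem.Str.strip line ≠ "" := pv_ne_empty (by decide) hH
    refine ⟨?_, ?_⟩
    · simp only [pvStepA, pvStepB, hH, hne, Bool.not_true, Bool.and_false, if_false,
        Bool.false_eq_true, if_pos]
      rcases segs.eq_nil_or_concat with rfl | ⟨xs, c, rfl⟩
      · simp [pvFP]
      · simp [pvFP, pvSegItem, pvDictA]
    · intro c hc
      simp only [pvStepB, hH, if_pos] at hc
      rcases List.mem_append.mp hc with h1 | h1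
      · exact h c h1
      · simp at h1; subst h1; simp
  · -- not a header
    have hH' : PySem.Chars.startswith (PySem.Chars.strip line.toList) ['#', '#', ' '] = false := by
      simpa using hH
    rcases segs.eq_nil_or_concat with rfl | ⟨xs, c, rfl⟩
    · refine ⟨?_, by intro c hc; simp [pvStepB, hH'] at hc⟩
      simp only [pvStepA, pvStepB]
      simp [hH']
    · simp only [List.concat_eq_append] at h ⊢
      have hc : c ≠ [] := h c (by simp)
      have hB : pvStepB (xs ++ [c]) line = xs ++ [c ++ [PySem.Str.strip line]] := by
        simp [pvStepB, hH']
      refine ⟨?_, ?_⟩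
      · rw [hB]
        simp only [List.dropLast_concat, List.getLast?_concat, Option.map_some,
          pvFP_append c hc]
        by_cases h0 : PySem.Str.strip line = ""
        · simp [pvStepA, h0, pvDstep]
        · simp only [pvStepA, pvDstep]
          simp [h0, hH', pvFP]
          split_ifs <;> simp_all
      · intro c' hc'
        rw [hB] at hc'
        rcases List.mem_append.mp hc' with h1 | h1
        · exact h c' (by simp [h1])
        · simp at h1; subst h1; simp

lemma pv_invariant (lines : List String) : ∀ (segs : List (List String)),
    (∀ c ∈ segs, c ≠ []) →
    lines.foldl pvStepA (segs.dropLast.map pvSegItem, segs.getLast?.map pvFP) =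
      ((lines.foldl pvStepB segs).dropLast.map pvSegItem,
       (lines.foldl pvStepB segs).getLast?.map pvFP) := by
  induction lines with
  | nil => intro segs h; rfl
  | cons line rest ih =>
    intro segs h
    obtain ⟨h1, h2⟩ := pv_step line segs h
    simp only [List.foldl_cons, h1]
    exact ih _ h2

lemma pv_finish (segs : List (List String)) :
    segs.dropLast.map pvSegItem ++
      (match segs.getLast?.map pvFP with | some p => [pvDictA p] | none => []) =
      segs.map pvSegItem := by
  rcases segs.eq_nil_or_concat with rfl | ⟨xs, c, rfl⟩ <;> simp [pvSegItem, pvFP, pvDictA]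

theorem pv_main (content : String) : parse_backlog_py content = parse_backlog_py_alt content := by
  unfold parse_backlog_py parse_backlog_py_alt
  have h0 : (([] : List (List (String × String))), (none : Option (String × String))) =
      (([] : List (List String)).dropLast.map pvSegItem, ([] : List (List String)).getLast?.map pvFP) := rfl
  simp only []
  rw [h0, pv_invariant _ [] (by simp)]
  exact pv_finish _

-- ===== VERDICT (by name: the statement is the Claim_ definition above) =====
theorem parse_backlog_py_spec : Claim_equal_parse_backlog_py := by
  intro content _
  exact pv_main content
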